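-- pv_equiv track=rewrite | github.com/DongJoon-Lee/python_study | program/p14_2.py | find_stu
-- ===== SOURCE A (Python) =====
-- def find_stu(num, name, a) :
--     res = dict()
--     for i in range(len(num)) :
--         res[num[i]] = name[i]
--     for x in res :
--         if a in res :
--             return res[a]
--     return '?'
-- ===== SOURCE B (Python) =====
-- def find_stu(num, name, a):
--     # scan backwards: the last occurrence of a in num wins, no dict needed
--     i = len(num) - 1
--     while i >= 0:
--         if num[i] == a:
--             return name[i]
--         i -= 1
--     return '?'
-- ===== Notes on version B (the rewrite author's own statement) =====
-- stated objective: simpler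
-- what changed: Replaces the dict build plus membership loop with a single backward index scan that returns the first match from the end (= last-wins), using no auxiliary data structure.
import Mathlib
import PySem

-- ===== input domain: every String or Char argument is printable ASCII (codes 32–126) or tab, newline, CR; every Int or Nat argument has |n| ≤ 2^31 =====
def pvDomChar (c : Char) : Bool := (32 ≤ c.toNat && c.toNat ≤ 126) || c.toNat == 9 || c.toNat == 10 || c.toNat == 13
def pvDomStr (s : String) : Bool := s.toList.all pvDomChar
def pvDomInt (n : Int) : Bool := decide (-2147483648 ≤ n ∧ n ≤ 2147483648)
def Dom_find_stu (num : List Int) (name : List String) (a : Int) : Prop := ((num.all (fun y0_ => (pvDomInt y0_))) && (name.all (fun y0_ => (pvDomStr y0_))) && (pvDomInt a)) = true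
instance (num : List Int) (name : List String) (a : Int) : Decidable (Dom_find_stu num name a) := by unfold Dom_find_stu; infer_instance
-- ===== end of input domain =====

-- B replaces A's dict build + membership loop by a single backward index scan (simpler, no auxiliary structure).

-- ===== PORT A =====
-- 'for x in res: if a in res: return res[a]' — the body never uses x; each iteration
-- performs the same membership test, so we recurse over res's keys list.
def find_stu_loop (res : PySem.Dict Int String) (a : Int) : List Int → String
  | [] => "?"
  | _ :: rest =>
    if res.contains a then (res.get? a).getD "?"   -- res[a]; guarded by 'a in res', so get? is some
    else find_stu_loop res a rest

-- indexing name[i] via pyGetD is exact under Pre_ (i < num.length ≤ name.length; Python raises outside Pre_)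
def find_stu (num : List Int) (name : List String) (a : Int) : String :=
  let res : PySem.Dict Int String :=
    (PySem.List.pyRange 0 (num.length : Int)).foldl
      (fun d i => d.insert (PySem.List.pyGetD num i 0) (PySem.List.pyGetD name i "")) PySem.Dict.empty
  find_stu_loop res a res.keys

-- ===== PORT B =====
-- while i >= 0: if num[i] == a: return name[i]; i -= 1   (argument n = i + 1)
-- name[i] via pyGetD is exact under Pre_ (Python B raises outside Pre_ only when a match sits past name's end)
def find_stu_alt_go (num : List Int) (name : List String) (a : Int) : Nat → String
  | 0 => "?"
  | Nat.succ i =>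
    if PySem.List.pyGetD num (i : Int) 0 = a then PySem.List.pyGetD name (i : Int) ""
    else find_stu_alt_go num name a i

def find_stu_alt (num : List Int) (name : List String) (a : Int) : String :=
  find_stu_alt_go num name a num.length

-- ===== PRECONDITION & SPEC =====
-- Pre_ excludes exactly the inputs where Python A raises IndexError: name shorter than num.
def Pre_find_stu (num : List Int) (name : List String) (a : Int) : Prop :=
  num.length ≤ name.length
instance (num : List Int) (name : List String) (a : Int) : Decidable (Pre_find_stu num name a) := by unfold Pre_find_stu; infer_instance

def pvWitness_find_stu : List Int × List String × Int := ([1, 2, 1], ["ann", "bob", "cho"], 1)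

def Spec_find_stu (num : List Int) (name : List String) (a : Int) (out : String) : Prop := out = find_stu_alt num name a
instance (num : List Int) (name : List String) (a : Int) (out : String) : Decidable (Spec_find_stu num name a out) := by unfold Spec_find_stu; infer_instance

-- ===== CLAIM (what is proved, stated in full; the proofs are below) =====
def Claim_equal_find_stu : Prop := ∀ (num : List Int) (name : List String) (a : Int), Dom_find_stu num name a → Pre_find_stu num name a → Spec_find_stu num name a (find_stu num name a)

-- ===== LEMMAS AND PROOFS =====

-- the dict A builds over the first n indices
def pvDictA (num : List Int) (name : List String) (n : Nat) : PySem.Dict Int String :=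
  (List.range n).foldl
    (fun d i => d.insert (num.getD i 0) (name.getD i "")) PySem.Dict.empty

lemma pvDictA_port (num : List Int) (name : List String) :
    (PySem.List.pyRange 0 (num.length : Int)).foldl
      (fun d i => d.insert (PySem.List.pyGetD num i 0) (PySem.List.pyGetD name i "")) PySem.Dict.empty
      = pvDictA num name num.length := by
  rw [PySem.List.pyRange_zero_natCast, List.foldl_map]
  simp [pvDictA, PySem.List.pyGetD_natCast]

-- the last-wins lookup as an Option, mirroring B's backward scan
def pvLook (num : List Int) (name : List String) (a : Int) : Nat → Option String
  | 0 => none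
  | Nat.succ i => if num.getD i 0 = a then some (name.getD i "") else pvLook num name a i

lemma pvDictA_get? (num : List Int) (name : List String) (a : Int) (n : Nat) :
    (pvDictA num name n).get? a = pvLook num name a n := by
  induction n with
  | zero => simp [pvDictA, pvLook]
  | succ n ih =>
    have : pvDictA num name (n + 1) = (pvDictA num name n).insert (num.getD n 0) (name.getD n "") := by
      simp [pvDictA, List.range_succ]
    rw [this, pvLook, PySem.Dict.get?_insert, ih]
    simp [eq_comm]

lemma find_stu_loop_eq (res : PySem.Dict Int String) (a : Int) (l : List Int) :
    find_stu_loop res a l =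
      if l = [] then "?" else ((res.get? a).getD "?") := by
  induction l with
  | nil => simp [find_stu_loop]
  | cons x rest ih =>
    rw [find_stu_loop, ih, PySem.Dict.contains_eq_isSome_get?]
    cases res.get? a <;> simp

lemma find_stu_alt_go_eq (num : List Int) (name : List String) (a : Int) (n : Nat) :
    find_stu_alt_go num name a n = (pvLook num name a n).getD "?" := by
  induction n with
  | zero => simp [find_stu_alt_go, pvLook]
  | succ i ih =>
    rw [find_stu_alt_go, pvLook, ih]
    simp only [PySem.List.pyGetD_natCast]
    split_ifs <;> simp

lemma pvDictA_keys_ne_nil (num : List Int) (name : List String) (n : Nat) (hn : n ≠ 0) :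
    (pvDictA num name n).keys ≠ [] := by
  obtain ⟨m, rfl⟩ := Nat.exists_eq_succ_of_ne_zero hn
  have : pvDictA num name (m + 1) = (pvDictA num name m).insert (num.getD m 0) (name.getD m "") := by
    simp [pvDictA, List.range_succ]
  rw [this]
  exact List.ne_nil_of_mem ((PySem.Dict.mem_keys_insert _ _ _ _).mpr (Or.inl rfl))

-- ===== VERDICT (by name: the statement is the Claim_ definition above) =====
theorem find_stu_spec : Claim_equal_find_stu := by
  intro num name a _ _
  unfold Spec_find_stu find_stu find_stu_alt
  rw [pvDictA_port, find_stu_loop_eq, find_stu_alt_go_eq, pvDictA_get?]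
  rcases h : num.length with _ | m
  · simp [pvLook, pvDictA]
  · rw [if_neg (pvDictA_keys_ne_nil num name (m + 1) (Nat.succ_ne_zero m))]
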